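-- pv_equiv track=rewrite | github.com/jebreimo/Yson | external/Yconvert/tools/codepages/make_codepage_file.py | get_char_ranges
-- ===== SOURCE A (Python) =====
-- def get_char_ranges(char_mapping):
--     if not char_mapping:
--         return None
--     ranges = [[char_mapping[0][0], char_mapping[0][1], 1]]
--     for index, char in char_mapping[1:]:
--         count = ranges[-1][2]
--         if index == ranges[-1][0] + count and char == ranges[-1][1] + count:
--             ranges[-1][2] += 1
--         else:
--             ranges.append([index, char, 1])
--     return ranges
-- ===== SOURCE B (Python) =====
-- def get_char_ranges(char_mapping):
--     if not char_mapping: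
--         return None
--     ranges = []
--     n = len(char_mapping)
--     s = 0
--     while s < n:
--         i, c = char_mapping[s]
--         e = s + 1
--         while e < n and char_mapping[e] == (i + (e - s), c + (e - s)):
--             e += 1
--         ranges.append([i, c, e - s])
--         s = e
--     return ranges
-- ===== Notes on version B (the rewrite author's own statement) =====
-- stated objective: alternative
-- what changed: Instead of a single fold that keeps the open range inside the output list and mutates its last element's count, B scans the list run by run: an inner index loop finds the end of each maximal arithmetic run (index and char both advancing by 1) and emits the completed [start,char,len] triple at once.
import Mathlib
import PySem

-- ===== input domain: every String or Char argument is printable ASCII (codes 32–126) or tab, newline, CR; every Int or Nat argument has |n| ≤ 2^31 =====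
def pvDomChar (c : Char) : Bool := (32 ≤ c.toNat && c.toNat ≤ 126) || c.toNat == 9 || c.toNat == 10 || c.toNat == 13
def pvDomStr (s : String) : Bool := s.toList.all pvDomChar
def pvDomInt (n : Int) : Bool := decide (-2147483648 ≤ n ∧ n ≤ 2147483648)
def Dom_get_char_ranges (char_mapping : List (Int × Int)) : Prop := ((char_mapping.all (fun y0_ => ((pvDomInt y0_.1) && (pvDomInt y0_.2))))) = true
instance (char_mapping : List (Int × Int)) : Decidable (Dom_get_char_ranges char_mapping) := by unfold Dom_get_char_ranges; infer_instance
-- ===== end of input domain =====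

-- B groups the mapping run by run with an index scan instead of A's fold that mutates the
-- last range's count; same O(n) cost, alternative structure.

-- ===== PORT A =====
-- one loop step of A: read ranges[-1] (ranges is never empty), extend it or append a new range
def pvStepA (ranges : List (List Int)) (p : Int × Int) : List (List Int) :=
  let last := ranges.getLastD []        -- ranges[-1]; ranges is always nonempty here
  let count := last.getD 2 0            -- ranges[-1][2]
  if p.1 = last.getD 0 0 + count ∧ p.2 = last.getD 1 0 + count then
    ranges.dropLast ++ [[last.getD 0 0, last.getD 1 0, count + 1]]   -- ranges[-1][2] += 1
  else
    ranges ++ [[p.1, p.2, 1]]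

def get_char_ranges (char_mapping : List (Int × Int)) : Option (List (List Int)) :=
  match char_mapping with
  | [] => none
  | (i0, c0) :: rest =>
    some (rest.foldl pvStepA [[i0, c0, 1]])

-- ===== PORT B =====
-- inner while loop of B: advance e while char_mapping[e] == (i + (e - s), c + (e - s))
def pvRunEndB (m : List (Int × Int)) (i c : Int) (s e : Nat) : Nat :=
  if h : e < m.length then
    if m[e] = (i + ((e : Int) - (s : Int)), c + ((e : Int) - (s : Int))) then
      pvRunEndB m i c s (e + 1)
    else e
  else e
termination_by m.length - e

theorem le_pvRunEndB (m : List (Int × Int)) (i c : Int) (s e : Nat) :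
    e ≤ pvRunEndB m i c s e := by
  unfold pvRunEndB
  split
  · split
    · exact le_trans (Nat.le_succ e) (le_pvRunEndB m i c s (e + 1))
    · exact le_refl e
  · exact le_refl e
termination_by m.length - e

-- outer while loop of B: emit one [i, c, e - s] triple per maximal run
def pvBuildB (m : List (Int × Int)) (s : Nat) : List (List Int) :=
  if h : s < m.length then
    let i := m[s].1
    let c := m[s].2
    let e := pvRunEndB m i c s (s + 1)
    [i, c, (e : Int) - (s : Int)] :: pvBuildB m e
  else []
termination_by m.length - s
decreasing_by
  have := le_pvRunEndB m m[s].1 m[s].2 s (s + 1)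
  omega

def get_char_ranges_alt (char_mapping : List (Int × Int)) : Option (List (List Int)) :=
  match char_mapping with
  | [] => none
  | _ :: _ => some (pvBuildB char_mapping 0)

-- ===== PRECONDITION & SPEC =====
def Spec_get_char_ranges (char_mapping : List (Int × Int)) (out : Option (List (List Int))) : Prop := out = get_char_ranges_alt char_mapping
instance (char_mapping : List (Int × Int)) (out : Option (List (List Int))) : Decidable (Spec_get_char_ranges char_mapping out) := by unfold Spec_get_char_ranges; infer_instance

-- ===== CLAIM (what is proved, stated in full; the proofs are below) =====
def Claim_equal_get_char_ranges : Prop := ∀ (char_mapping : List (Int × Int)), Dom_get_char_ranges char_mapping → Spec_get_char_ranges char_mapping (get_char_ranges char_mapping)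

-- ===== LEMMAS AND PROOFS =====

-- length of the maximal run continuing (i, c) at offset k
def pvLrun (i c k : Int) : List (Int × Int) → Nat
  | [] => 0
  | (j, d) :: rest => if j = i + k ∧ d = c + k then 1 + pvLrun i c (k + 1) rest else 0

-- clean list-level form of the result
def pvSB : List (Int × Int) → List (List Int)
  | [] => []
  | (i, c) :: rest => [i, c, 1 + (pvLrun i c 1 rest : Int)] :: pvSB (rest.drop (pvLrun i c 1 rest))
termination_by m => m.length
decreasing_by simp

theorem pvSB_nil : pvSB [] = [] := by unfold pvSB; rfl

theorem pvSB_cons (i c : Int) (r : List (Int × Int)) :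
    pvSB ((i, c) :: r) = [i, c, 1 + (pvLrun i c 1 r : Int)] :: pvSB (r.drop (pvLrun i c 1 r)) := by
  conv_lhs => unfold pvSB

-- A's reference recursion: pending range [i, c, k], remaining input
def pvRA (i c k : Int) : List (Int × Int) → List (List Int)
  | [] => [[i, c, k]]
  | (j, d) :: rest =>
    if j = i + k ∧ d = c + k then pvRA i c (k + 1) rest
    else [i, c, k] :: pvRA j d 1 rest

theorem foldl_stepA (rest : List (Int × Int)) :
    ∀ (acc : List (List Int)) (i c k : Int),
    List.foldl pvStepA (acc ++ [[i, c, k]]) rest = acc ++ pvRA i c k rest := by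
  induction rest with
  | nil => intro acc i c k; simp [pvRA]
  | cons p rest ih =>
    intro acc i c k
    obtain ⟨j, d⟩ := p
    rw [List.foldl_cons, pvRA]
    by_cases h : j = i + k ∧ d = c + k
    · rw [if_pos h]
      have hstep : pvStepA (acc ++ [[i, c, k]]) (j, d) = acc ++ [[i, c, k + 1]] := by
        simp [pvStepA, h.1, h.2]
      rw [hstep, ih]
    · rw [if_neg h]
      have hstep : pvStepA (acc ++ [[i, c, k]]) (j, d)
          = (acc ++ [[i, c, k]]) ++ [[j, d, 1]] := by
        simp only [pvStepA, List.getLastD_concat, List.getD]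
        rw [if_neg (by simpa using h)]
      rw [hstep, ih, List.append_assoc, List.singleton_append]

theorem pvRA_eq_SB (rest : List (Int × Int)) :
    ∀ (i c k : Int),
    pvRA i c k rest = [i, c, k + (pvLrun i c k rest : Int)] :: pvSB (rest.drop (pvLrun i c k rest)) := by
  induction rest with
  | nil => intro i c k; rw [pvRA, pvLrun]; simp [pvSB_nil]
  | cons p rest ih =>
    intro i c k
    obtain ⟨j, d⟩ := p
    by_cases h : j = i + k ∧ d = c + k
    · rw [pvRA, pvLrun, if_pos h, if_pos h, ih]
      have h1 : k + ((1 + pvLrun i c (k + 1) rest : Nat) : Int)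
           = k + 1 + (pvLrun i c (k + 1) rest : Int) := by push_cast; ring
      rw [h1, Nat.add_comm 1, List.drop_succ_cons]
    · rw [pvRA, pvLrun, if_neg h, if_neg h, ih, ← pvSB_cons]
      simp

theorem pvRunEndB_eq (m : List (Int × Int)) (i c : Int) (s e : Nat) :
    pvRunEndB m i c s e = e + pvLrun i c ((e : Int) - (s : Int)) (m.drop e) := by
  fun_induction pvRunEndB m i c s e with
  | case1 e h hc ih =>
    rw [List.drop_eq_getElem_cons h, hc, pvLrun, if_pos ⟨rfl, rfl⟩, ih]
    have h1 : ((e + 1 : Nat) : Int) - (s : Int) = (e : Int) - (s : Int) + 1 := by omega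
    rw [h1]
    omega
  | case2 e h hc =>
    rw [List.drop_eq_getElem_cons h, pvLrun,
        if_neg (fun hx => hc (Prod.ext_iff.mpr hx))]
    simp
  | case3 e h =>
    rw [List.drop_eq_nil_iff.mpr (by omega), pvLrun]
    simp

theorem pvBuildB_eq (m : List (Int × Int)) (s : Nat) : pvBuildB m s = pvSB (m.drop s) := by
  fun_induction pvBuildB m s with
  | case1 s h i c e ih =>
    have hi : i = m[s].1 := rfl
    have hc2 : c = m[s].2 := rfl
    have hrun : e = (s + 1) + pvLrun m[s].1 m[s].2 1 (m.drop (s + 1)) := by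
      show pvRunEndB m i c s (s + 1) = _
      rw [hi, hc2, pvRunEndB_eq]
      have h1 : ((s + 1 : Nat) : Int) - (s : Int) = 1 := by push_cast; ring
      rw [h1]
    rw [List.drop_eq_getElem_cons h, pvSB_cons]
    congr 1
    · have h2 : ((e : Nat) : Int) - (s : Int)
          = 1 + (pvLrun m[s].1 m[s].2 1 (m.drop (s + 1)) : Int) := by
        rw [hrun]; push_cast; ring
      rw [hi, hc2, h2]
    · rw [ih, hrun, List.drop_drop]
  | case2 s h =>
    rw [List.drop_eq_nil_iff.mpr (by omega), pvSB_nil]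

-- ===== VERDICT (by name: the statement is the Claim_ definition above) =====
theorem get_char_ranges_spec : Claim_equal_get_char_ranges := by
  intro m _
  unfold Spec_get_char_ranges
  match m with
  | [] => rfl
  | (i, c) :: rest =>
    show some _ = some _
    congr 1
    have hA : List.foldl pvStepA ([] ++ [[i, c, 1]]) rest = [] ++ pvRA i c 1 rest :=
      foldl_stepA rest [] i c 1
    simp only [List.nil_append] at hA
    show List.foldl pvStepA [[i, c, 1]] rest = _
    rw [hA, pvBuildB_eq ((i, c) :: rest) 0, List.drop_zero, pvSB_cons, pvRA_eq_SB]
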